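-- pv_equiv track=rewrite | github.com/Shortarms703/math_solver | math_classes.py | stops_increasing
-- ===== SOURCE A (Python) =====
-- def stops_increasing(operator_dict, start):
--     values_left = []
--     list_importances = list(operator_dict.values())
--     section = list_importances[:start][::-1]
--     for i, j in zip(range(len(section)), list(operator_dict.keys())[:start][::-1]):
--         if section[i] > list_importances[start]:
--             values_left.append(j)
--         else:
--             break
--     values_right = []
--     section = list_importances[start+1:]
--     for i, j in zip(range(len(section)), list(operator_dict.keys())[start+1:]):
--         if section[i] > list_importances[start]:
--             values_right.append(j)
--         else:
--             break
--     if values_left and values_right: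
--         return min(values_left, key=lambda x: operator_dict[x]), min(values_right, key=lambda x: operator_dict[x])
--     elif values_left:
--         return min(values_left, key=lambda x: operator_dict[x]), None
--     elif values_right:
--         return None, min(values_right, key=lambda x: operator_dict[x])
--     else:
--         return None, None
-- ===== SOURCE B (Python) =====
-- def stops_increasing(operator_dict, start):
--     items = list(operator_dict.items())
--     idx = range(len(items))[start]  # normalize index; IndexError exactly like list indexing
--     thr = items[idx][1]
--     left = right = run = None
--     for i, (k, v) in enumerate(items):
--         if i < idx:
--             # best of the current run of values > thr, resetting on a break value;
--             # update on <= so the later (closer to idx) of tied minima wins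
--             if v > thr:
--                 if run is None or v <= run[1]:
--                     run = (k, v)
--             else:
--                 run = None
--         elif i == idx:
--             left = run[0] if run else None
--         elif v <= thr:
--             break
--         else:
--             if right is None or v < right[1]:
--                 right = (k, v)
--     return left, right[0] if right else None
-- ===== Notes on version B (the rewrite author's own statement) =====
-- stated objective: alternative
-- what changed: A makes two outward scans from start over separately sliced-and-reversed value/key lists, collecting each run of keys into a list and then running min(..., key=dict lookup) over it with a four-way if/elif; B makes ONE forward pass over enumerate(items), maintaining a run-best that resets whenever a value breaks the threshold (the run adjacent to start is what survives when index start is reached) and a running best for the right side, with no slices, no intermediate key lists and no min().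
-- intended difference: On start = -1 with a nonempty dict whose first value exceeds its last, A slices the right side as [start+1:] = [0:] (the whole dict) and returns a phantom right neighbour; B returns None on the right, the intended value since the last operator has nothing to its right. — e.g. on stops_increasing([("a", 5), ("b", 1)], -1): A returns (some "a", some "a"), B returns (some "a", none)
-- outside the precondition, e.g. on stops_increasing({}, 0): A returns (None, None), B raises IndexError
import Mathlib
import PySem

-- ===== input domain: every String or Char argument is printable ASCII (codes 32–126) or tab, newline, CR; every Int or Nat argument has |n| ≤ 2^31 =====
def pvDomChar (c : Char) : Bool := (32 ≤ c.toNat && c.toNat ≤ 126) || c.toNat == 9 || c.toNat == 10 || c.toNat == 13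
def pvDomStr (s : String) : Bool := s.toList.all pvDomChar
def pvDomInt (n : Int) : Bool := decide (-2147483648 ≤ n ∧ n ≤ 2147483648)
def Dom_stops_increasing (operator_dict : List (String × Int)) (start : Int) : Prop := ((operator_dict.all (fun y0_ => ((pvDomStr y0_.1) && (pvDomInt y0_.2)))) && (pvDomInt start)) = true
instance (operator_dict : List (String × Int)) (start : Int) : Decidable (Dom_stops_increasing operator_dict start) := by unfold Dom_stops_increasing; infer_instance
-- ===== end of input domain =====

-- B replaces A's two outward slice-scans (collect each run into a list, then min() over it,
-- four-way if/elif) by ONE forward pass over enumerate(items) with run-reset state; equivalence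
-- of RETURN VALUES is proved outside D_ (A's start = -1 right-slice slip).

-- ===== PORT A =====
-- the 'for i, j in zip(range(len(section)), keys): if section[i] > thr: append(j) else: break' loop;
-- zip of the aligned (value, key) pairs is exact since section[i] is the value paired with j
def pvCollect (pairs : List (Int × String)) (thr : Int) : List String :=
  match pairs with
  | [] => []
  | (v, j) :: rest => if v > thr then j :: pvCollect rest thr else []

def stops_increasing (operator_dict : List (String × Int)) (start : Int) : Option String × Option String :=
  let d := PySem.Dict.ofList operator_dict
  let list_importances := d.values
  -- list_importances[start]: evaluated by Python inside the loops; none = IndexError, excluded by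
  -- Pre_ (on the empty dict, also outside Pre_, both loops are vacuous and A returns (None, None))
  match PySem.List.pyGet? list_importances start with
  | none => (none, none)
  | some thr =>
    let keys := d.keys
    let sectionL := (PySem.List.slice list_importances none (some start)).reverse
    let keysL := (PySem.List.slice keys none (some start)).reverse
    let values_left := pvCollect (sectionL.zip keysL) thr
    let sectionR := PySem.List.slice list_importances (some (start + 1)) none
    let keysR := PySem.List.slice keys (some (start + 1)) none
    let values_right := pvCollect (sectionR.zip keysR) thr
    let key := fun x => d.getD x 0     -- operator_dict[x]; x is always a key of d
    if values_left ≠ [] ∧ values_right ≠ [] then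
      (PySem.List.min? values_left key, PySem.List.min? values_right key)
    else if values_left ≠ [] then (PySem.List.min? values_left key, none)
    else if values_right ≠ [] then (none, PySem.List.min? values_right key)
    else (none, none)

-- ===== PORT B =====
-- 'if right is None or v < right[1]: right = (k, v)'
def pvStep {α : Type} (key : α → Int) (acc : Option α) (x : α) : Option α :=
  match acc with
  | none => some x
  | some m => if key x < key m then some x else some m

-- 'if run is None or v <= run[1]: run = (k, v)'
def pvStepLE (acc : Option (String × Int)) (x : String × Int) : Option (String × Int) :=
  match acc with
  | none => some x
  | some m => if x.2 ≤ m.2 then some x else some m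

-- the single 'for i, (k, v) in enumerate(items)' loop of Source B, with its three-way branch on i vs idx
def pvLoop (items : List (String × Int)) (i idx : Nat) (thr : Int)
    (run : Option (String × Int)) (left : Option String) (right : Option (String × Int)) :
    Option String × Option (String × Int) :=
  match items with
  | [] => (left, right)
  | (k, v) :: rest =>
    if i < idx then
      if thr < v then pvLoop rest (i + 1) idx thr (pvStepLE run (k, v)) left right
      else pvLoop rest (i + 1) idx thr none left right
    else if i = idx then
      pvLoop rest (i + 1) idx thr run (run.map (fun p => p.1)) right
    else if v ≤ thr then (left, right)      -- break
    else pvLoop rest (i + 1) idx thr run left (pvStep (fun p => p.2) right (k, v))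

def stops_increasing_alt (operator_dict : List (String × Int)) (start : Int) : Option String × Option String :=
  let items := (PySem.Dict.ofList operator_dict).items
  -- range(len(items))[start]: the normalized index; none = IndexError, excluded by Pre_
  match PySem.List.pyIdx? items.length start with
  | none => (none, none)
  | some idx =>
    match items[idx]? with
    | none => (none, none)      -- unreachable: idx < items.length
    | some (_, thr) =>
      match pvLoop items 0 idx thr none none none with
      | (l, r) => (l, r.map (fun p => p.1))

-- ===== PRECONDITION & SPEC =====
-- Pre_ excludes exactly the inputs where B raises IndexError: start out of range for the dict.
-- A raises there too, EXCEPT on the empty dict (any start), where A returns (None, None) only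
-- because the out-of-range indexing sits inside loops that are never entered; B raises there.
def Pre_stops_increasing (operator_dict : List (String × Int)) (start : Int) : Prop :=
  PySem.Raise.InRange (PySem.Dict.ofList operator_dict).size start
instance (operator_dict : List (String × Int)) (start : Int) : Decidable (Pre_stops_increasing operator_dict start) := by unfold Pre_stops_increasing; infer_instance

def pvWitness_stops_increasing : (List (String × Int)) × Int := ([("a", 2), ("b", 1)], 1)

-- A at start = -1 slices the right side as [start+1:] = [0:], i.e. the WHOLE dict, so whenever the
-- first value exceeds the last it reports a phantom right neighbour (some key); B returns none on
-- the right there, which is intended: the last operator has nothing to its right.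
def D_stops_increasing (operator_dict : List (String × Int)) (start : Int) : Prop :=
  start = -1 ∧
    (match (PySem.Dict.ofList operator_dict).items.head?, (PySem.Dict.ofList operator_dict).items.getLast? with
     | some p, some q => decide (q.2 < p.2)
     | _, _ => false) = true
instance (operator_dict : List (String × Int)) (start : Int) : Decidable (D_stops_increasing operator_dict start) := by unfold D_stops_increasing; infer_instance

def Spec_stops_increasing (operator_dict : List (String × Int)) (start : Int) (out : Option String × Option String) : Prop := ¬ D_stops_increasing operator_dict start → out = stops_increasing_alt operator_dict start
instance (operator_dict : List (String × Int)) (start : Int) (out : Option String × Option String) : Decidable (Spec_stops_increasing operator_dict start out) := by unfold Spec_stops_increasing; infer_instance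

def pvDiffWitness_stops_increasing : (List (String × Int)) × Int := ([("a", 5), ("b", 1)], -1)
def pvDiffWitnessOut_stops_increasing : (Option String × Option String) × (Option String × Option String) :=
  ((some "a", some "a"), (some "a", none))

-- ===== CLAIM (what is proved, stated in full; the proofs are below) =====
def Claim_unchanged_stops_increasing : Prop := ∀ (operator_dict : List (String × Int)) (start : Int), Dom_stops_increasing operator_dict start → Pre_stops_increasing operator_dict start → Spec_stops_increasing operator_dict start (stops_increasing operator_dict start)
def Claim_changed_stops_increasing : Prop := Dom_stops_increasing (pvDiffWitness_stops_increasing.1) (pvDiffWitness_stops_increasing.2) ∧ Pre_stops_increasing (pvDiffWitness_stops_increasing.1) (pvDiffWitness_stops_increasing.2) ∧ D_stops_increasing (pvDiffWitness_stops_increasing.1) (pvDiffWitness_stops_increasing.2) ∧ stops_increasing (pvDiffWitness_stops_increasing.1) (pvDiffWitness_stops_increasing.2) = pvDiffWitnessOut_stops_increasing.1 ∧ stops_increasing_alt (pvDiffWitness_stops_increasing.1) (pvDiffWitness_stops_increasing.2) = pvDiffWitnessOut_stops_increasing.2 ∧ pvDiffWitnessOut_stops_increasing.1 ≠ pvDi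ffWitnessOut_stops_increasing.2
def Claim_exact_stops_increasing : Prop := ∀ (operator_dict : List (String × Int)) (start : Int), Dom_stops_increasing operator_dict start → Pre_stops_increasing operator_dict start → D_stops_increasing operator_dict start → stops_increasing operator_dict start ≠ stops_increasing_alt operator_dict start

-- ===== LEMMAS AND PROOFS =====

-- generic slice facts
theorem pv_slice_to {α : Type} (xs : List α) (s : Int) :
    PySem.List.slice xs none (some s) = xs.take (PySem.List.clampIdx xs.length s) := by
  simp [PySem.List.slice]

theorem pv_slice_from {α : Type} (xs : List α) (s : Int) :
    PySem.List.slice xs (some s) none = xs.drop (PySem.List.clampIdx xs.length s) := by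
  simp [PySem.List.slice]

-- normalized index: value of pyIdx? and of the clamps A's slices use, under the in-range hypothesis
theorem pv_idx_spec (n : Nat) (s : Int) (h1 : -(n : Int) ≤ s) (h2 : s < n) :
    ∃ idx : Nat, PySem.List.pyIdx? n s = some idx ∧ idx < n ∧
      PySem.List.clampIdx n s = idx ∧
      (s ≠ -1 → PySem.List.clampIdx n (s + 1) = idx + 1) ∧
      (s = -1 → idx + 1 = n ∧ PySem.List.clampIdx n (s + 1) = 0) := by
  refine ⟨if 0 ≤ s then s.toNat else n - (-s).toNat, ?_, ?_, ?_, ?_, ?_⟩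
  · simp only [PySem.List.pyIdx?]; split_ifs <;> simp_all
  · split_ifs <;> omega
  · simp only [PySem.List.clampIdx]; split_ifs <;> omega
  · intro hne; simp only [PySem.List.clampIdx]; split_ifs <;> omega
  · intro he; subst he; simp only [PySem.List.clampIdx]; split_ifs <;> omega

-- A's collect loop over (value, key) pairs drawn from a pair list
theorem pv_pvCollect_map (l : List (String × Int)) (thr : Int) :
    pvCollect (l.map (fun p => (p.2, p.1))) thr
      = (l.takeWhile (fun p => decide (thr < p.2))).map (fun p => p.1) := by
  induction l with
  | nil => rfl
  | cons p rest ih =>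
    by_cases h : thr < p.2
    · simp [pvCollect, h, ih]
    · simp [pvCollect, h]

theorem pv_min?_eq_foldl {α : Type} (xs : List α) (key : α → Int) :
    PySem.List.min? xs key = xs.foldl (pvStep key) none := rfl

-- running-min folds commute with projecting the key component
theorem pv_foldl_min_map (key : String → Int) :
    ∀ (ps : List (String × Int)) (m : Option (String × Int)),
      (∀ p ∈ ps, key p.1 = p.2) → (∀ p, m = some p → key p.1 = p.2) →
      List.foldl (pvStep key) (m.map (fun p => p.1)) (ps.map (fun p => p.1))
      = (List.foldl (pvStep (fun p => p.2)) m ps).map (fun p => p.1)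
  | [], m, _, _ => rfl
  | p :: rest, m, h, hm => by
    have hk : key p.1 = p.2 := h p (List.mem_cons_self)
    have hrest : ∀ q ∈ rest, key q.1 = q.2 := fun q hq => h q (List.mem_cons_of_mem _ hq)
    simp only [List.map_cons, List.foldl_cons]
    cases m with
    | none =>
      exact pv_foldl_min_map key rest (some p) hrest
        (by intro q hq; cases hq; exact hk)
    | some mm =>
      have hkm : key mm.1 = mm.2 := hm mm rfl
      simp only [Option.map_some]
      rw [show pvStep key (some mm.1) p.1
            = (pvStep (fun q => q.2) (some mm) p).map (fun q => q.1) by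
          simp only [pvStep, hk, hkm]; split_ifs <;> rfl]
      exact pv_foldl_min_map key rest (pvStep (fun q => q.2) (some mm) p) hrest
        (by simp only [pvStep]; intro q hq; split_ifs at hq <;> cases hq
            · exact hk
            · exact hkm)

theorem pv_min?_key_map (key : String → Int) (ps : List (String × Int))
    (h : ∀ p ∈ ps, key p.1 = p.2) :
    PySem.List.min? (ps.map (fun p => p.1)) key
      = (PySem.List.min? ps (fun p => p.2)).map (fun p => p.1) := by
  rw [pv_min?_eq_foldl, pv_min?_eq_foldl]
  exact pv_foldl_min_map key ps none h (by intro p hp; cases hp)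

-- the four-way if of A collapses: min over [] is none
theorem pv_if_collapse (vl vr : List String) (key : String → Int) :
    (if vl ≠ [] ∧ vr ≠ [] then (PySem.List.min? vl key, PySem.List.min? vr key)
     else if vl ≠ [] then (PySem.List.min? vl key, none)
     else if vr ≠ [] then (none, PySem.List.min? vr key)
     else (none, none))
    = (PySem.List.min? vl key, PySem.List.min? vr key) := by
  by_cases hvl : vl = [] <;> by_cases hvr : vr = [] <;>
    simp [PySem.List.min?, hvl, hvr]

-- membership chains from the scanned runs back into the dict's items
theorem pv_mem_take_rev {idx : Nat} {l : List (String × Int)} {thr : Int} {p : String × Int}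
    (hp : p ∈ ((l.take idx).reverse).takeWhile (fun q => decide (thr < q.2))) : p ∈ l :=
  List.mem_of_mem_take (List.mem_reverse.mp ((List.takeWhile_sublist _).mem hp))

theorem pv_mem_drop {idx : Nat} {l : List (String × Int)} {thr : Int} {p : String × Int}
    (hp : p ∈ (l.drop idx).takeWhile (fun q => decide (thr < q.2))) : p ∈ l :=
  List.mem_of_mem_drop ((List.takeWhile_sublist _).mem hp)

-- B's loop, phase after idx: a running-< scan with break over the strict run
theorem pv_loop_right (thr : Int) :
    ∀ (suf : List (String × Int)) (i idx : Nat) (run : Option (String × Int))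
      (left : Option String) (right : Option (String × Int)), idx < i →
      pvLoop suf i idx thr run left right
        = (left, List.foldl (pvStep (fun p => p.2)) right (suf.takeWhile (fun p => decide (thr < p.2))))
  | [], _, _, _, _, _, _ => rfl
  | (k, v) :: rest, i, idx, run, left, right, h => by
    have h1 : ¬ i < idx := by omega
    have h2 : ¬ i = idx := by omega
    by_cases hv : v ≤ thr
    · have hnt : ¬ thr < v := by omega
      simp [pvLoop, h1, h2, hv, hnt]
    · have ht : thr < v := by omega
      rw [show pvLoop ((k, v) :: rest) i idx thr run left right
            = pvLoop rest (i + 1) idx thr run left (pvStep (fun p => p.2) right (k, v)) by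
          simp [pvLoop, h1, h2, hv]]
      rw [pv_loop_right thr rest (i + 1) idx run left _ (by omega),
        List.takeWhile_cons_of_pos (by simpa using ht), List.foldl_cons]

-- B's loop, phase before idx: a reset-fold over the prefix, then left is recorded at idx
theorem pv_loop_prefix (thr : Int) :
    ∀ (pre : List (String × Int)) (p : String × Int) (suf : List (String × Int)) (i : Nat)
      (run : Option (String × Int)) (left : Option String) (right : Option (String × Int)),
      pvLoop (pre ++ p :: suf) i (i + pre.length) thr run left right
        = ((List.foldl (fun m q => if thr < q.2 then pvStepLE m q else none) run pre).map (fun q => q.1),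
           List.foldl (pvStep (fun q => q.2)) right (suf.takeWhile (fun q => decide (thr < q.2))))
  | [], p, suf, i, run, left, right => by
    simp only [List.nil_append, List.length_nil, Nat.add_zero, pvLoop, lt_irrefl]
    rw [pv_loop_right thr suf (i + 1) i run _ right (by omega)]
    rfl
  | (k, v) :: pre', p, suf, i, run, left, right => by
    have hlt : i < i + ((k, v) :: pre').length := by simp
    by_cases hv : thr < v
    · simp only [List.cons_append, pvLoop, if_pos hlt, if_pos hv, List.foldl_cons]
      have := pv_loop_prefix thr pre' p suf (i + 1) (pvStepLE run (k, v)) left right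
      rw [show i + ((k, v) :: pre').length = (i + 1) + pre'.length by simp; omega]
      rw [this]
    · simp only [List.cons_append, pvLoop, if_pos hlt, if_neg hv, List.foldl_cons]
      have := pv_loop_prefix thr pre' p suf (i + 1) none left right
      rw [show i + ((k, v) :: pre').length = (i + 1) + pre'.length by simp; omega]
      rw [this]

-- the reset-fold keeps only the trailing strict run of the prefix
theorem pv_reset_trailing (thr : Int) (pre : List (String × Int)) :
    List.foldl (fun m q => if thr < q.2 then pvStepLE m q else none) none pre
      = List.foldl pvStepLE none ((pre.reverse.takeWhile (fun q => decide (thr < q.2))).reverse) := by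
  induction pre using List.reverseRecOn with
  | nil => rfl
  | append_singleton ys x ih =>
    rw [List.foldl_append, ih, List.reverse_append, List.reverse_cons, List.reverse_nil,
      List.nil_append, List.cons_append, List.nil_append, List.takeWhile_cons]
    by_cases hx : thr < x.2
    · simp [hx]
    · simp [hx]

-- pointwise values of the two update steps
theorem pvStep_none (x : String × Int) : pvStep (fun q => q.2) none x = some x := rfl
theorem pvStep_some (y a : String × Int) :
    pvStep (fun q => q.2) (some a) y = some (if y.2 < a.2 then y else a) := by
  show (if y.2 < a.2 then some y else some a) = _
  split_ifs <;> rfl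
theorem pvStepLE_some (x a : String × Int) :
    pvStepLE (some a) x = some (if x.2 ≤ a.2 then x else a) := by
  show (if x.2 ≤ a.2 then some x else some a) = _
  split_ifs <;> rfl

-- ≤-update absorbed into a <-fold from the left
theorem pv_LE_aux (x : String × Int) :
    ∀ (t : List (String × Int)) (a : String × Int),
      pvStepLE (List.foldl (pvStep (fun q => q.2)) (some a) t) x
        = List.foldl (pvStep (fun q => q.2)) (some (if x.2 ≤ a.2 then x else a)) t
  | [], a => by
    simp only [List.foldl_nil, pvStepLE_some]
  | y :: t', a => by
    simp only [List.foldl_cons]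
    rw [pvStep_some y a, pv_LE_aux x t' (if y.2 < a.2 then y else a),
      pvStep_some y (if x.2 ≤ a.2 then x else a)]
    congr 1
    congr 1
    split_ifs <;> first | rfl | omega

-- the last-minimal-by-≤ fold over the reverse equals the first-minimal-by-< fold
theorem pv_foldlLE_reverse :
    ∀ (l : List (String × Int)),
      List.foldl pvStepLE none l.reverse = List.foldl (pvStep (fun q => q.2)) none l
  | [] => rfl
  | x :: t => by
    rw [List.reverse_cons, List.foldl_append, pv_foldlLE_reverse t, List.foldl_cons,
      List.foldl_nil]
    cases t with
    | nil => rfl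
    | cons b t' =>
      simp only [List.foldl_cons, pvStep_none]
      rw [pvStep_some b x, pv_LE_aux x t' b]
      congr 1
      congr 1
      split_ifs <;> first | rfl | omega

-- B's loop in closed form: first-minimal key of each strict run beside idx
theorem pv_loop_closed (l : List (String × Int)) (idx : Nat) (k0 : String) (v0 : Int)
    (hlt : idx < l.length) (hkv : l[idx]? = some (k0, v0)) :
    pvLoop l 0 idx v0 none none none
      = ((PySem.List.min? ((l.take idx).reverse.takeWhile (fun q => decide (v0 < q.2))) (fun q => q.2)).map (fun q => q.1),
         PySem.List.min? ((l.drop (idx + 1)).takeWhile (fun q => decide (v0 < q.2))) (fun q => q.2)) := by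
  obtain ⟨pre, suf, hsplit, hlen⟩ : ∃ pre suf, l = pre ++ (k0, v0) :: suf ∧ pre.length = idx := by
    refine ⟨l.take idx, l.drop (idx + 1), ?_, by rw [List.length_take]; omega⟩
    conv_lhs => rw [← List.take_append_drop idx l]
    rw [List.drop_eq_getElem_cons hlt]
    have h3 := List.getElem?_eq_getElem hlt
    rw [hkv] at h3
    rw [← Option.some.inj h3]
  subst hsplit
  have ht : (pre ++ (k0, v0) :: suf).take idx = pre := List.take_left' hlen
  have hd : (pre ++ (k0, v0) :: suf).drop (idx + 1) = suf := by
    rw [show pre ++ (k0, v0) :: suf = (pre ++ [(k0, v0)]) ++ suf by simp]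
    exact List.drop_left' (by simp [hlen])
  rw [ht, hd, show idx = 0 + pre.length by omega,
    pv_loop_prefix v0 pre (k0, v0) suf 0 none none none, pv_reset_trailing, pv_foldlLE_reverse,
    pv_min?_eq_foldl, pv_min?_eq_foldl]

-- B's result in closed form, under the in-range hypotheses
theorem pv_alt_eq (od : List (String × Int)) (start : Int) (idx : Nat) (k0 : String) (v0 : Int)
    (hidx : PySem.List.pyIdx? (PySem.Dict.ofList od).items.length start = some idx)
    (hlt : idx < (PySem.Dict.ofList od).items.length)
    (hkv : (PySem.Dict.ofList od).items[idx]? = some (k0, v0)) :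
    stops_increasing_alt od start
      = ((PySem.List.min? (((PySem.Dict.ofList od).items.take idx).reverse.takeWhile (fun q => decide (v0 < q.2))) (fun q => q.2)).map (fun q => q.1),
         (PySem.List.min? (((PySem.Dict.ofList od).items.drop (idx + 1)).takeWhile (fun q => decide (v0 < q.2))) (fun q => q.2)).map (fun q => q.1)) := by
  simp only [stops_increasing_alt, hidx, hkv, pv_loop_closed _ idx k0 v0 hlt hkv]

theorem pv_main (od : List (String × Int)) (start : Int)
    (hpre : Pre_stops_increasing od start)
    (hnd : ¬ D_stops_increasing od start) :
    stops_increasing od start = stops_increasing_alt od start := by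
  unfold Pre_stops_increasing PySem.Raise.InRange PySem.Dict.size at hpre
  obtain ⟨h1, h2⟩ := hpre
  obtain ⟨idx, hidx, hlt, hcl, hcl1, hcl2⟩ :=
    pv_idx_spec (PySem.Dict.ofList od).items.length start h1 h2
  have hnodup := PySem.Dict.nodup_keys_ofList (ps := od)
  obtain ⟨k0, v0, hkv⟩ : ∃ k v, (PySem.Dict.ofList od).items[idx]? = some (k, v) :=
    ⟨((PySem.Dict.ofList od).items[idx]'hlt).1, ((PySem.Dict.ofList od).items[idx]'hlt).2, by
      rw [List.getElem?_eq_getElem hlt]⟩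
  have hkey : ∀ p ∈ (PySem.Dict.ofList od).items, (PySem.Dict.ofList od).getD p.1 0 = p.2 :=
    fun p hp => PySem.Dict.getD_of_mem_items _ hp hnodup 0
  have hvals : (PySem.Dict.ofList od).values = (PySem.Dict.ofList od).items.map (fun p => p.2) := rfl
  have hkeys : (PySem.Dict.ofList od).keys = (PySem.Dict.ofList od).items.map (fun p => p.1) := rfl
  have hget : PySem.List.pyGet? ((PySem.Dict.ofList od).values) start = some v0 := by
    unfold PySem.List.pyGet?
    rw [hvals, List.length_map, hidx]
    simp only [Option.bind_some, List.getElem?_map, hkv, Option.map_some]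
  have hL : (PySem.List.slice (PySem.Dict.ofList od).values none (some start)).reverse.zip
        ((PySem.List.slice (PySem.Dict.ofList od).keys none (some start)).reverse)
      = (((PySem.Dict.ofList od).items.take idx).reverse).map (fun p => (p.2, p.1)) := by
    rw [hvals, hkeys, pv_slice_to, pv_slice_to, List.length_map, List.length_map, hcl,
        ← List.map_take, ← List.map_take, ← List.map_reverse, ← List.map_reverse, List.zip_map']
  rw [pv_alt_eq od start idx k0 v0 hidx hlt hkv]
  simp only [stops_increasing, hget]
  rw [pv_if_collapse, hL, pv_pvCollect_map,
      pv_min?_key_map _ _ (fun p hp => hkey p (pv_mem_take_rev hp))]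
  by_cases hs : start = -1
  · -- right side: A scans the whole dict but its first comparison fails (¬ D_); B scans nothing
    obtain ⟨hn, hc0⟩ := hcl2 hs
    have hdropB : (PySem.Dict.ofList od).items.drop (idx + 1) = [] := by
      rw [hn]; exact List.drop_length
    have hR0 : PySem.List.slice (PySem.Dict.ofList od).values (some (start + 1)) none
        = (PySem.Dict.ofList od).items.map (fun p => p.2) := by
      rw [hvals, pv_slice_from, List.length_map, hc0, List.drop_zero]
    have hR0k : PySem.List.slice (PySem.Dict.ofList od).keys (some (start + 1)) none
        = (PySem.Dict.ofList od).items.map (fun p => p.1) := by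
      rw [hkeys, pv_slice_from, List.length_map, hc0, List.drop_zero]
    rw [hR0, hR0k, List.zip_map', pv_pvCollect_map]
    -- the dict is nonempty; extract head and last
    obtain ⟨p0, rest, hcons⟩ : ∃ p0 rest, (PySem.Dict.ofList od).items = p0 :: rest := by
      cases h : (PySem.Dict.ofList od).items with
      | nil => rw [h] at hlt; simp at hlt
      | cons a l => exact ⟨a, l, rfl⟩
    have hne : (PySem.Dict.ofList od).items ≠ [] := by rw [hcons]; simp
    have hitem : (PySem.Dict.ofList od).items[idx] = (k0, v0) := by
      have h3 := List.getElem?_eq_getElem hlt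
      rw [hkv] at h3
      exact Option.some.inj h3.symm
    have hglast : (PySem.Dict.ofList od).items.getLast? = some (k0, v0) := by
      rw [List.getLast?_eq_some_getLast hne, List.getLast_eq_getElem hne]
      have hix : (PySem.Dict.ofList od).items.length - 1 = idx := by omega
      simp only [hix, hitem]
    have hhead : (PySem.Dict.ofList od).items.head? = some p0 := by rw [hcons]; rfl
    have hnotlt : ¬ (v0 < p0.2) := by
      intro hcon
      refine hnd ⟨hs, ?_⟩
      rw [hhead, hglast]
      simpa using hcon
    have htw : ((PySem.Dict.ofList od).items).takeWhile (fun q => decide (v0 < q.2)) = [] := by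
      rw [hcons, List.takeWhile_cons_of_neg (by simpa using hnotlt)]
    rw [htw, hdropB]
    rfl
  · have hR : PySem.List.slice (PySem.Dict.ofList od).values (some (start + 1)) none
        = ((PySem.Dict.ofList od).items.drop (idx + 1)).map (fun p => p.2) := by
      rw [hvals, pv_slice_from, List.length_map, hcl1 hs, List.map_drop]
    have hRk : PySem.List.slice (PySem.Dict.ofList od).keys (some (start + 1)) none
        = ((PySem.Dict.ofList od).items.drop (idx + 1)).map (fun p => p.1) := by
      rw [hkeys, pv_slice_from, List.length_map, hcl1 hs, List.map_drop]
    rw [hR, hRk, List.zip_map', pv_pvCollect_map,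
        pv_min?_key_map _ _ (fun p hp => hkey p (pv_mem_drop hp))]

-- ===== VERDICT (by name: the statement is the Claim_ definition above) =====
theorem stops_increasing_spec : Claim_unchanged_stops_increasing := by
  intro od start _ hpre hnd
  exact pv_main od start hpre hnd

theorem stops_increasing_changed : Claim_changed_stops_increasing := by
  unfold Claim_changed_stops_increasing; decide

theorem stops_increasing_tight : Claim_exact_stops_increasing := by
  unfold Claim_exact_stops_increasing
  intro od start _ hpre hD
  obtain ⟨hs, hm⟩ := hD
  unfold Pre_stops_increasing PySem.Raise.InRange PySem.Dict.size at hpre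
  obtain ⟨h1, h2⟩ := hpre
  obtain ⟨idx, hidx, hlt, hcl, hcl1, hcl2⟩ :=
    pv_idx_spec (PySem.Dict.ofList od).items.length start h1 h2
  obtain ⟨hn, hc0⟩ := hcl2 hs
  obtain ⟨k0, v0, hkv⟩ : ∃ k v, (PySem.Dict.ofList od).items[idx]? = some (k, v) :=
    ⟨((PySem.Dict.ofList od).items[idx]'hlt).1, ((PySem.Dict.ofList od).items[idx]'hlt).2, by
      rw [List.getElem?_eq_getElem hlt]⟩
  have hvals : (PySem.Dict.ofList od).values = (PySem.Dict.ofList od).items.map (fun p => p.2) := rfl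
  have hkeys : (PySem.Dict.ofList od).keys = (PySem.Dict.ofList od).items.map (fun p => p.1) := rfl
  have hget : PySem.List.pyGet? ((PySem.Dict.ofList od).values) start = some v0 := by
    unfold PySem.List.pyGet?
    rw [hvals, List.length_map, hidx]
    simp only [Option.bind_some, List.getElem?_map, hkv, Option.map_some]
  obtain ⟨p0, rest, hcons⟩ : ∃ p0 rest, (PySem.Dict.ofList od).items = p0 :: rest := by
    cases h : (PySem.Dict.ofList od).items with
    | nil => rw [h] at hlt; simp at hlt
    | cons a l => exact ⟨a, l, rfl⟩
  have hne : (PySem.Dict.ofList od).items ≠ [] := by rw [hcons]; simp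
  have hitem : (PySem.Dict.ofList od).items[idx] = (k0, v0) := by
    have h3 := List.getElem?_eq_getElem hlt
    rw [hkv] at h3
    exact Option.some.inj h3.symm
  have hglast : (PySem.Dict.ofList od).items.getLast? = some (k0, v0) := by
    rw [List.getLast?_eq_some_getLast hne, List.getLast_eq_getElem hne]
    have hix : (PySem.Dict.ofList od).items.length - 1 = idx := by omega
    simp only [hix, hitem]
  have hhead : (PySem.Dict.ofList od).items.head? = some p0 := by rw [hcons]; rfl
  have hlt0 : v0 < p0.2 := by
    rw [hhead, hglast] at hm
    simpa using hm
  have hR0 : PySem.List.slice (PySem.Dict.ofList od).values (some (start + 1)) none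
      = (PySem.Dict.ofList od).items.map (fun p => p.2) := by
    rw [hvals, pv_slice_from, List.length_map, hc0, List.drop_zero]
  have hR0k : PySem.List.slice (PySem.Dict.ofList od).keys (some (start + 1)) none
      = (PySem.Dict.ofList od).items.map (fun p => p.1) := by
    rw [hkeys, pv_slice_from, List.length_map, hc0, List.drop_zero]
  have hB2 : (stops_increasing_alt od start).2 = none := by
    rw [pv_alt_eq od start idx k0 v0 hidx hlt hkv]
    rw [show (PySem.Dict.ofList od).items.drop (idx + 1) = [] by rw [hn]; exact List.drop_length]
    rfl
  have hA2 : (stops_increasing od start).2 ≠ none := by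
    simp only [stops_increasing, hget]
    rw [pv_if_collapse, hR0, hR0k, List.zip_map', pv_pvCollect_map, hcons,
        List.takeWhile_cons_of_pos (by simpa using hlt0)]
    simp [PySem.List.min?_eq_none_iff]
  intro heq
  exact hA2 (by rw [heq, hB2])
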